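-- pv_equiv track=rewrite | github.com/OliverP255/text-to-geometry | agent/brep_preview.py | _check_watertight_edge_count
-- ===== SOURCE A (Python) =====
-- def _check_watertight_edge_count(faces: list[list[int]]) -> bool:
--     """
--     Check watertight by counting edge occurrences.
--
--     A watertight mesh has every edge shared by exactly 2 faces.
--     """
--     from collections import defaultdict
--
--     edge_counts: dict[tuple[int, int], int] = defaultdict(int)
--
--     for face in faces:
--         if len(face) < 3:
--             continue
--
--         # Get edges (sorted tuple for undirected edge)
--         for i in range(len(face)):
--             v1, v2 = face[i], face[(i + 1) % len(face)]
--             edge = tuple(sorted([v1, v2]))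
--             edge_counts[edge] += 1
--
--     # Check all edges have count of 2
--     for count in edge_counts.values():
--         if count != 2:
--             return False
--
--     return True
-- ===== SOURCE B (Python) =====
-- def _check_watertight_edge_count(faces: list[list[int]]) -> bool:
--     """Watertight iff every undirected edge occurs exactly twice.
--
--     Collect all canonical (sorted-pair) edges into one flat list, SORT it,
--     then scan the sorted list run by run: every run of equal edges must have
--     length exactly 2.  No dictionary / counting structure is used.
--     """
--     edges = []
--     for face in faces:
--         n = len(face)
--         if n < 3:
--             continue
--         for i in range(n):
--             a, b = face[i], face[(i + 1) % n]
--             edges.append((a, b) if a <= b else (b, a))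
--     edges.sort()
--     m = len(edges)
--     i = 0
--     while i < m:
--         j = i + 1
--         while j < m and edges[j] == edges[i]:
--             j += 1
--         if j - i != 2:
--             return False
--         i = j
--     return True
-- ===== Notes on version B (the rewrite author's own statement) =====
-- stated objective: alternative
-- what changed: Replaces the defaultdict edge-count table and the scan over its values by a sort-based algorithm: flatten all canonical edges into one list, sort it lexicographically, and scan the sorted list run by run, requiring every run of equal edges to have length exactly 2; no counting structure exists at all.
import Mathlib
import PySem

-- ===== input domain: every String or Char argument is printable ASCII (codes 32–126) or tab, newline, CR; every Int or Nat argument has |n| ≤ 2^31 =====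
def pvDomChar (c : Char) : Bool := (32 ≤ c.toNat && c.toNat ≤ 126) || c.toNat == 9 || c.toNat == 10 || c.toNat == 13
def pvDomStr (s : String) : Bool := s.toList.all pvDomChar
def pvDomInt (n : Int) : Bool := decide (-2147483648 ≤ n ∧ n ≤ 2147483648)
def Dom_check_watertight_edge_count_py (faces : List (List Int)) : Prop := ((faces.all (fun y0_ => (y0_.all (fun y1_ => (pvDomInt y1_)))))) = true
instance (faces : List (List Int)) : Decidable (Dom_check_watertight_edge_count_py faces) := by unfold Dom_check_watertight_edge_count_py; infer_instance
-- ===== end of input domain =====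

-- B replaces A's defaultdict count table + value scan by a sort-based algorithm: flatten all
-- canonical edges into one list, sort it lexicographically, and scan the sorted list run by
-- run requiring each run length to be exactly 2 (objective: alternative, no speed claim).

-- ===== PORT A =====
-- Literal port of A. Indices i and (i+1) % len(face) are always in range (i drawn from
-- range(len(face))), so pyGetD is exact here; tuple(sorted([v1, v2])) on a two-element
-- list is exactly (v1, v2) if v1 ≤ v2 else (v2, v1).
def check_watertight_edge_count_py (faces : List (List Int)) : Bool :=
  let edge_counts : PySem.Dict (Int × Int) Int :=
    faces.foldl (fun d face =>
      if face.length < 3 then d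
      else
        (PySem.List.pyRange 0 (face.length : Int) 1).foldl (fun d i =>
          let v1 := PySem.List.pyGetD face i 0
          let v2 := PySem.List.pyGetD face (PySem.Int.mod (i + 1) (face.length : Int)) 0
          let edge := if v1 ≤ v2 then (v1, v2) else (v2, v1)
          d.modify edge 0 (· + 1)) d)
      PySem.Dict.empty
  -- 'for count in edge_counts.values(): if count != 2: return False' then 'return True'
  edge_counts.values.all (fun c => c == 2)

-- ===== PORT B =====
-- The run-scanning while loop of Source B: each outer iteration stands at the start of a run
-- of equal edges (i), advances j past the run (takeWhile/dropWhile of the tail), demands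
-- the run have length 2 (j - i == 2), and continues from the remainder.
def pvRunScan : List (Int × Int) → Bool
  | [] => true
  | x :: xs =>
    ((xs.takeWhile (fun y => y == x)).length + 1 == 2)
      && pvRunScan (xs.dropWhile (fun y => y == x))
termination_by l => l.length
decreasing_by
  have := List.length_dropWhile_le (fun y => y == x) xs
  simp; omega

-- Port of Source B: build the flat canonical-edge list with appends, sort it (Python's tuple
-- comparison is the lexicographic order, i.e. '<' on Lex (Int × Int), so the key 'toLex'
-- is exact), then run-scan.
def check_watertight_edge_count_py_alt (faces : List (List Int)) : Bool :=
  let edges : List (Int × Int) :=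
    faces.foldl (fun es face =>
      if face.length < 3 then es
      else
        (PySem.List.pyRange 0 (face.length : Int) 1).foldl (fun es i =>
          let a := PySem.List.pyGetD face i 0
          let b := PySem.List.pyGetD face (PySem.Int.mod (i + 1) (face.length : Int)) 0
          es ++ [if a ≤ b then (a, b) else (b, a)]) es) []
  pvRunScan (PySem.List.sorted edges (fun p => (toLex p : Lex (Int × Int))) false)

-- ===== PRECONDITION & SPEC =====
def Spec_check_watertight_edge_count_py (faces : List (List Int)) (out : Bool) : Prop := out = check_watertight_edge_count_py_alt faces
instance (faces : List (List Int)) (out : Bool) : Decidable (Spec_check_watertight_edge_count_py faces out) := by unfold Spec_check_watertight_edge_count_py; infer_instance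

-- ===== CLAIM (what is proved, stated in full; the proofs are below) =====
def Claim_equal_check_watertight_edge_count_py : Prop := ∀ (faces : List (List Int)), Dom_check_watertight_edge_count_py faces → Spec_check_watertight_edge_count_py faces (check_watertight_edge_count_py faces)

-- ===== LEMMAS AND PROOFS =====

-- The (sorted) edges of one face, and of the whole mesh.
def pvEdges (face : List Int) : List (Int × Int) :=
  (PySem.List.pyRange 0 (face.length : Int) 1).map (fun i =>
    let a := PySem.List.pyGetD face i 0
    let b := PySem.List.pyGetD face (PySem.Int.mod (i + 1) (face.length : Int)) 0
    if a ≤ b then (a, b) else (b, a))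

def pvE (faces : List (List Int)) : List (Int × Int) :=
  faces.flatMap (fun f => if f.length < 3 then [] else pvEdges f)

lemma pvFoldl_flatMap {α β σ : Type} (step : σ → β → σ) (piece : α → List β) :
    ∀ (l : List α) (init : σ),
      (l.flatMap piece).foldl step init = l.foldl (fun s a => (piece a).foldl step s) init := by
  intro l
  induction l with
  | nil => intro init; rfl
  | cons x xs ih => intro init; simp [List.flatMap_cons, List.foldl_append, ih]

lemma pvDictA (faces : List (List Int)) (d : PySem.Dict (Int × Int) Int) :
    faces.foldl (fun d face =>
      if face.length < 3 then d
      else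
        (PySem.List.pyRange 0 (face.length : Int) 1).foldl (fun d i =>
          let v1 := PySem.List.pyGetD face i 0
          let v2 := PySem.List.pyGetD face (PySem.Int.mod (i + 1) (face.length : Int)) 0
          let edge := if v1 ≤ v2 then (v1, v2) else (v2, v1)
          d.modify edge 0 (· + 1)) d) d
    = (pvE faces).foldl (fun d x => d.modify x 0 (· + 1)) d := by
  rw [pvE, pvFoldl_flatMap]
  induction faces generalizing d with
  | nil => rfl
  | cons f fs ih =>
    simp only [List.foldl_cons]
    rw [ih]
    congr 1
    by_cases h : f.length < 3
    · simp [h]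
    · simp only [h, if_false, pvEdges, List.foldl_map]

-- A in closed form: all distinct edges occur exactly twice
lemma pvA_eq (faces : List (List Int)) :
    check_watertight_edge_count_py faces
      = (PySem.Set.ofList (pvE faces)).all (fun k => ((pvE faces).count k : Int) == 2) := by
  unfold check_watertight_edge_count_py
  rw [pvDictA]
  have hc : (pvE faces).foldl (fun d x => d.modify x 0 (· + 1)) PySem.Dict.empty
      = PySem.Dict.counter (pvE faces) := (PySem.Dict.counter_eq_foldl _).symm
  rw [hc]
  simp only [PySem.Dict.values, PySem.Dict.items_counter, List.map_map, List.all_map]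
  rfl

-- B's edge list is pvE faces
lemma pvEdgesB (faces : List (List Int)) (acc : List (Int × Int)) :
    faces.foldl (fun es face =>
      if face.length < 3 then es
      else
        (PySem.List.pyRange 0 (face.length : Int) 1).foldl (fun es i =>
          let a := PySem.List.pyGetD face i 0
          let b := PySem.List.pyGetD face (PySem.Int.mod (i + 1) (face.length : Int)) 0
          es ++ [if a ≤ b then (a, b) else (b, a)]) es) acc
    = acc ++ pvE faces := by
  induction faces generalizing acc with
  | nil => simp [pvE]
  | cons f fs ih =>
    simp only [List.foldl_cons]
    rw [ih]
    by_cases h : f.length < 3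
    · simp [pvE, h, List.flatMap_cons]
    · simp only [h, if_false, PySem.List.foldl_append_singleton_eq_map, pvE,
        List.flatMap_cons, pvEdges]
      simp [List.append_assoc]

-- every element past the dropped run of x's differs from x (in a lex-sorted list)
lemma pvDropWhile_ne (x : Int × Int) :
    ∀ (xs : List (Int × Int)),
      (∀ y ∈ xs, (toLex x : Lex (Int × Int)) ≤ toLex y) →
      xs.Pairwise (fun a b => (toLex a : Lex (Int × Int)) ≤ toLex b) →
      ∀ a ∈ xs.dropWhile (fun y => y == x), a ≠ x := by
  intro xs
  induction xs with
  | nil => intro _ _ a ha; simp [List.dropWhile] at ha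
  | cons z zs ih =>
    intro hall hpw a ha
    rw [List.pairwise_cons] at hpw
    by_cases hz : (z == x) = true
    · rw [List.dropWhile_cons, if_pos hz] at ha
      exact ih (fun y hy => hall y (List.mem_cons_of_mem _ hy)) hpw.2 a ha
    · rw [List.dropWhile_cons, if_neg hz] at ha
      have hzx : z ≠ x := by simpa using hz
      have hxz : (toLex x : Lex (Int × Int)) < toLex z := by
        have := hall z (List.mem_cons_self)
        rcases lt_or_eq_of_le this with h | h
        · exact h
        · exact absurd (toLex.injective h) (Ne.symm hzx)
      rcases List.mem_cons.mp ha with rfl | hmem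
      · exact hzx
      · intro hax
        have : (toLex z : Lex (Int × Int)) ≤ toLex a := hpw.1 a hmem
        subst hax
        exact absurd (lt_of_lt_of_le hxz this) (lt_irrefl _)

-- run-scan on a lex-sorted list ⇔ every element occurs exactly twice
lemma pvRunScan_spec :
    ∀ (n : Nat) (l : List (Int × Int)), l.length ≤ n →
      l.Pairwise (fun a b => (toLex a : Lex (Int × Int)) ≤ toLex b) →
      (pvRunScan l = true ↔ ∀ k ∈ l, l.count k = 2) := by
  intro n
  induction n with
  | zero =>
    intro l hl _
    have : l = [] := List.eq_nil_of_length_eq_zero (Nat.le_zero.mp hl)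
    subst this
    simp [pvRunScan]
  | succ n ih =>
    intro l hl hpw
    cases l with
    | nil => simp [pvRunScan]
    | cons x xs =>
      have hall : ∀ y ∈ xs, (toLex x : Lex (Int × Int)) ≤ toLex y :=
        (List.pairwise_cons.mp hpw).1
      have hpwxs := (List.pairwise_cons.mp hpw).2
      set run := xs.takeWhile (fun y => y == x) with hrun
      set rest := xs.dropWhile (fun y => y == x) with hrest
      have hsplit : xs = run ++ rest := (List.takeWhile_append_dropWhile).symm
      have hrun_eq : ∀ a ∈ run, a = x := by
        intro a ha
        have := List.mem_takeWhile_imp ha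
        simpa using this
      have hrest_ne : ∀ a ∈ rest, a ≠ x := pvDropWhile_ne x xs hall hpwxs
      have hrest_pw : rest.Pairwise (fun a b => (toLex a : Lex (Int × Int)) ≤ toLex b) :=
        hpwxs.sublist (List.dropWhile_sublist _)
      have hrest_len : rest.length ≤ n := by
        have h1 : rest.length ≤ xs.length := List.length_dropWhile_le _ _
        simp at hl; omega
      have hcount_x : (x :: xs).count x = run.length + 1 := by
        rw [List.count_cons_self, hsplit, List.count_append]
        have h1 : run.count x = run.length :=
          List.count_eq_length.mpr (fun b hb => (hrun_eq b hb).symm)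
        have h2 : rest.count x = 0 :=
          List.count_eq_zero.mpr (fun hmem => (hrest_ne x hmem) rfl)
        omega
      have hcount_rest : ∀ k ∈ rest, (x :: xs).count k = rest.count k := by
        intro k hk
        have hkx : k ≠ x := hrest_ne k hk
        rw [List.count_cons_of_ne (Ne.symm hkx), hsplit, List.count_append]
        have : run.count k = 0 :=
          List.count_eq_zero.mpr (fun hmem => hkx (hrun_eq k hmem))
        omega
      have hscan : pvRunScan (x :: xs)
          = (((run.length + 1 == 2) : Bool) && pvRunScan rest) := by
        rw [pvRunScan]
      rw [hscan, Bool.and_eq_true, beq_iff_eq,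
        ih rest hrest_len hrest_pw]
      constructor
      · rintro ⟨hlen, hrest2⟩ k hk
        rcases List.mem_cons.mp hk with rfl | hk'
        · rw [hcount_x]; omega
        · rw [hsplit] at hk'
          rcases List.mem_append.mp hk' with hkr | hkr
          · have := hrun_eq k hkr; subst this
            rw [hcount_x]; omega
          · rw [hcount_rest k hkr]; exact hrest2 k hkr
      · intro h2
        have hx2 := h2 x List.mem_cons_self
        rw [hcount_x] at hx2
        refine ⟨by omega, ?_⟩
        intro k hk
        rw [← hcount_rest k hk]
        exact h2 k (List.mem_cons_of_mem _ (hsplit ▸ List.mem_append_right _ hk))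

-- ===== VERDICT (by name: the statement is the Claim_ definition above) =====
theorem check_watertight_edge_count_py_spec : Claim_equal_check_watertight_edge_count_py := by
  unfold Claim_equal_check_watertight_edge_count_py
  intro faces _
  unfold Spec_check_watertight_edge_count_py
  rw [pvA_eq]
  unfold check_watertight_edge_count_py_alt
  rw [pvEdgesB, List.nil_append]
  set E := pvE faces with hE
  set S := PySem.List.sorted E (fun p => (toLex p : Lex (Int × Int))) false with hS
  have hperm : S.Perm E := PySem.List.sorted_perm E _ _
  have hpw : S.Pairwise (fun a b => (toLex a : Lex (Int × Int)) ≤ toLex b) :=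
    PySem.List.sorted_pairwise E _
  have hB := pvRunScan_spec S.length S le_rfl hpw
  have hiff : (∀ k ∈ S, S.count k = 2) ↔ (∀ k ∈ E, E.count k = 2) := by
    constructor
    · intro h k hk
      rw [← hperm.count_eq]
      exact h k (hperm.mem_iff.mpr hk)
    · intro h k hk
      rw [hperm.count_eq]
      exact h k (hperm.mem_iff.mp hk)
  have hA : ((PySem.Set.ofList E).all (fun k => ((E.count k : Int) == 2)) = true)
      ↔ (∀ k ∈ E, E.count k = 2) := by
    rw [List.all_eq_true]
    constructor
    · intro h k hk
      have := h k ((PySem.Set.mem_ofList _ _).mpr hk)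
      have h2 : (E.count k : Int) = 2 := by simpa using this
      exact_mod_cast h2
    · intro h k hk
      have hk' := (PySem.Set.mem_ofList _ _).mp hk
      have : (E.count k : Int) = 2 := by exact_mod_cast h k hk'
      simpa using this
  rw [Bool.eq_iff_iff, hA, hB, hiff]
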